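-- pv_equiv track=rewrite | github.com/LliliLlooping/CMU_02604BioinformaticsAlgorithms | Week7/TwoBreak.py | _single_genome_to_graph
-- ===== SOURCE A (Python) =====
-- from typing import List, Tuple
--
-- def _single_genome_to_graph(cycle: List[int]):
--
--     colored_edges = []
--
--     len_genome = len(cycle)
--     for i in range(len_genome):
--
--         n1, n2 = cycle[i], cycle[(i + 1) % len_genome]
--
--         if n1 > 0 and n2 > 0:
--             colored_edges.append((2 * n1, 2 * n2 - 1))
--
--         elif n1 > 0 and n2 < 0:
--             colored_edges.append((2 * n1, 2 * -n2))
--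
--         elif n1 < 0 and n2 > 0:
--             colored_edges.append((2 * -n1 - 1, 2 * n2 - 1))
--
--         elif n1 < 0 and n2 < 0:
--             colored_edges.append((2 * -n1 - 1, 2 * -n2))
--
--     return colored_edges
-- ===== SOURCE B (Python) =====
-- from typing import List, Tuple
--
-- def _single_genome_to_graph(cycle: List[int]):
--     # ChromosomeToCycle: flat node list, then pair consecutive (out, in) nodes.
--     nodes = []
--     for n in cycle:
--         nodes += [2 * n - 1, 2 * n] if n > 0 else [-2 * n, -2 * n - 1]
--     m = len(nodes)
--     return [(nodes[2 * k + 1], nodes[(2 * k + 2) % m]) for k in range(len(cycle))]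
-- ===== Notes on version B (the rewrite author's own statement) =====
-- stated objective: alternative
-- what changed: Replaces A's single pass with a 4-way sign-branch per adjacent pair by the textbook two-phase decomposition: first build the flat ChromosomeToCycle node list (two nodes per signed block), then a second pass pairs node 2k+1 with node (2k+2) mod 2n to form each colored edge.
-- outside the precondition, e.g. on _single_genome_to_graph([1, -2, 0, 3]): A returns [(2, 4), (6, 1)], B returns [(2, 4), (3, 0), (-1, 5), (6, 1)]
import Mathlib
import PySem

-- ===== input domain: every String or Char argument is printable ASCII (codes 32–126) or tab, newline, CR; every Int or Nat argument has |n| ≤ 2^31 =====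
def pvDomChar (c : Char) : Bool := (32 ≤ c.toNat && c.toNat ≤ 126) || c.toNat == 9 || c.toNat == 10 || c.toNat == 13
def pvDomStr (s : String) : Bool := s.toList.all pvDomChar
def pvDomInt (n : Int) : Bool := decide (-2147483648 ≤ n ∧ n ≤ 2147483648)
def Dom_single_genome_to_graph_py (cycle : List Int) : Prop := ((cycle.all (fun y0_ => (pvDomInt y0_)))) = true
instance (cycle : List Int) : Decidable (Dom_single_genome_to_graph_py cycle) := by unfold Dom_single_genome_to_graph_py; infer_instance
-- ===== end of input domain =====

-- B replaces A's single 4-way-branching sign pass by ChromosomeToCycle (a flat node list) plus a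
-- simple wraparound pairing pass (objective: alternative decomposition, same cost).

-- ===== PORT A =====
def single_genome_to_graph_py (cycle : List Int) : List (Int × Int) :=
  let lenGenome : Int := cycle.length
  (PySem.List.pyRange 0 lenGenome 1).foldl (fun coloredEdges i =>
    let n1 := PySem.List.pyGetD cycle i 0
    let n2 := PySem.List.pyGetD cycle (PySem.Int.mod (i + 1) lenGenome) 0
    if n1 > 0 ∧ n2 > 0 then coloredEdges ++ [(2 * n1, 2 * n2 - 1)]
    else if n1 > 0 ∧ n2 < 0 then coloredEdges ++ [(2 * n1, 2 * -n2)]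
    else if n1 < 0 ∧ n2 > 0 then coloredEdges ++ [(2 * -n1 - 1, 2 * n2 - 1)]
    else if n1 < 0 ∧ n2 < 0 then coloredEdges ++ [(2 * -n1 - 1, 2 * -n2)]
    else coloredEdges) []

-- ===== PORT B =====
def single_genome_to_graph_py_alt (cycle : List Int) : List (Int × Int) :=
  let nodes := cycle.foldl
    (fun ns n => ns ++ (if n > 0 then [2 * n - 1, 2 * n] else [-2 * n, -2 * n - 1])) []
  let m : Int := nodes.length
  (List.range cycle.length).map (fun (k : Nat) =>
    (PySem.List.pyGetD nodes (2 * (k : Int) + 1) 0,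
     PySem.List.pyGetD nodes (PySem.Int.mod (2 * (k : Int) + 2) m) 0))

-- ===== PRECONDITION & SPEC =====
-- Pre_ excludes cycles containing the block 0 (not a valid signed block), on which A's four sign
-- tests all fail and it silently drops the adjacent edges while B emits node pairs built from 0 —
-- both values are accidental corner behaviour no caller would specify.
def Pre_single_genome_to_graph_py (cycle : List Int) : Prop := ∀ x ∈ cycle, x ≠ 0
instance (cycle : List Int) : Decidable (Pre_single_genome_to_graph_py cycle) := by
  unfold Pre_single_genome_to_graph_py; infer_instance

def pvWitness_single_genome_to_graph_py : List Int := [1, -2, 3]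

def Spec_single_genome_to_graph_py (cycle : List Int) (out : List (Int × Int)) : Prop := out = single_genome_to_graph_py_alt cycle
instance (cycle : List Int) (out : List (Int × Int)) : Decidable (Spec_single_genome_to_graph_py cycle out) := by unfold Spec_single_genome_to_graph_py; infer_instance

-- ===== CLAIM (what is proved, stated in full; the proofs are below) =====
def Claim_equal_single_genome_to_graph_py : Prop := ∀ (cycle : List Int), Dom_single_genome_to_graph_py cycle → Pre_single_genome_to_graph_py cycle → Spec_single_genome_to_graph_py cycle (single_genome_to_graph_py cycle)

-- ===== LEMMAS AND PROOFS =====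

-- the tail node (edge source) and head node (edge target) of a signed block
def pvOutN (n : Int) : Int := if n > 0 then 2 * n else -2 * n - 1
def pvInN (n : Int) : Int := if n > 0 then 2 * n - 1 else -2 * n

-- the node pair B builds for one block
def pvNode (n : Int) : List Int := if n > 0 then [2 * n - 1, 2 * n] else [-2 * n, -2 * n - 1]

theorem pvNode_eq (n : Int) : pvNode n = [pvInN n, pvOutN n] := by
  unfold pvNode pvInN pvOutN; split <;> rfl

theorem pvNode_flat_length (cycle : List Int) :
    (cycle.flatMap pvNode).length = 2 * cycle.length := by
  induction cycle with
  | nil => rfl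
  | cons c cs ih => simp [List.flatMap_cons, pvNode_eq, ih]; omega

theorem pvFlat_getD_even (cycle : List Int) (k : Nat) (hk : k < cycle.length) :
    (cycle.flatMap pvNode).getD (2 * k) 0 = pvInN (cycle.getD k 0) := by
  induction cycle generalizing k with
  | nil => simp at hk
  | cons c cs ih =>
    rw [List.flatMap_cons, pvNode_eq]
    cases k with
    | zero => rfl
    | succ k' =>
      have h2 : 2 * (k' + 1) = (2 * k') + 1 + 1 := by omega
      rw [h2]
      simpa using ih k' (by simpa using hk)

theorem pvFlat_getD_odd (cycle : List Int) (k : Nat) (hk : k < cycle.length) :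
    (cycle.flatMap pvNode).getD (2 * k + 1) 0 = pvOutN (cycle.getD k 0) := by
  induction cycle generalizing k with
  | nil => simp at hk
  | cons c cs ih =>
    rw [List.flatMap_cons, pvNode_eq]
    cases k with
    | zero => rfl
    | succ k' =>
      have h2 : 2 * (k' + 1) + 1 = (2 * k' + 1) + 1 + 1 := by omega
      rw [h2]
      simpa using ih k' (by simpa using hk)

-- A's loop, rewritten: under Pre_, each iteration appends exactly the (out, in) edge
theorem pvA_eq_map (cycle : List Int) (hpre : ∀ x ∈ cycle, x ≠ 0) :
    single_genome_to_graph_py cycle =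
      (PySem.List.pyRange 0 (cycle.length : Int) 1).map (fun i =>
        (pvOutN (PySem.List.pyGetD cycle i 0),
         pvInN (PySem.List.pyGetD cycle (PySem.Int.mod (i + 1) (cycle.length : Int)) 0))) := by
  unfold single_genome_to_graph_py
  rw [PySem.List.foldl_congr_mem _ _
      (fun acc i => acc ++ [(pvOutN (PySem.List.pyGetD cycle i 0),
        pvInN (PySem.List.pyGetD cycle (PySem.Int.mod (i + 1) (cycle.length : Int)) 0))]) _ ?_]
  · rw [PySem.List.foldl_append_singleton_eq_map]; simp
  · intro acc i hi
    rw [PySem.List.mem_pyRange_one] at hi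
    have hlen : (0 : Int) < cycle.length := lt_of_le_of_lt hi.1 hi.2
    have hn1 : PySem.List.pyGetD cycle i 0 ∈ cycle := by
      rw [PySem.List.pyGetD_eq_getElem cycle 0 hi.1 hi.2]
      exact List.getElem_mem _
    have hmod0 : 0 ≤ PySem.Int.mod (i + 1) (cycle.length : Int) :=
      PySem.Int.mod_nonneg _ hlen
    have hmod1 : PySem.Int.mod (i + 1) (cycle.length : Int) < (cycle.length : Int) :=
      PySem.Int.mod_lt _ hlen
    have hn2 : PySem.List.pyGetD cycle (PySem.Int.mod (i + 1) (cycle.length : Int)) 0 ∈ cycle := by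
      rw [PySem.List.pyGetD_eq_getElem cycle 0 hmod0 hmod1]
      exact List.getElem_mem _
    have h1 := hpre _ hn1
    have h2 := hpre _ hn2
    rcases lt_or_gt_of_ne h1 with hs1 | hs1 <;> rcases lt_or_gt_of_ne h2 with hs2 | hs2 <;>
      simp [pvOutN, pvInN, hs1, hs2, lt_asymm]

-- B, rewritten: the node list is the flatMap of pvNode
theorem pvB_nodes (cycle : List Int) :
    cycle.foldl
      (fun ns n => ns ++ (if n > 0 then [2 * n - 1, 2 * n] else [-2 * n, -2 * n - 1])) [] =
      cycle.flatMap pvNode := by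
  show List.foldl (fun ns n => ns ++ pvNode n) [] cycle = _
  rw [PySem.List.foldl_append_eq_flatMap pvNode]; rfl

-- B, fully rewritten to the flatMap form
theorem pvB_eq (cycle : List Int) :
    single_genome_to_graph_py_alt cycle =
      (List.range cycle.length).map (fun (k : Nat) =>
        (PySem.List.pyGetD (cycle.flatMap pvNode) (2 * (k : Int) + 1) 0,
         PySem.List.pyGetD (cycle.flatMap pvNode)
           (PySem.Int.mod (2 * (k : Int) + 2) (((cycle.flatMap pvNode).length : Nat) : Int)) 0)) := by
  unfold single_genome_to_graph_py_alt
  rw [pvB_nodes]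

-- ===== VERDICT (by name: the statement is the Claim_ definition above) =====
theorem single_genome_to_graph_py_spec : Claim_equal_single_genome_to_graph_py := by
  intro cycle _ hpre
  unfold Spec_single_genome_to_graph_py
  rw [pvA_eq_map cycle hpre, pvB_eq, PySem.List.pyRange_zero_natCast, List.map_map]
  refine List.map_congr_left ?_
  intro k hk
  rw [List.mem_range] at hk
  have hcast1 : (2 : Int) * (k : Int) + 1 = ((2 * k + 1 : Nat) : Int) := by push_cast; ring
  have hcast2 : ((cycle.length : Nat) : Int) * 2 = ((2 * cycle.length : Nat) : Int) := by
    push_cast; ring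
  simp only [Function.comp]
  rw [hcast1]
  simp only [PySem.List.pyGetD_natCast]
  rw [pvFlat_getD_odd cycle k hk]
  by_cases hlast : k + 1 < cycle.length
  · have hm1 : PySem.Int.mod ((k : Int) + 1) (cycle.length : Int) = ((k + 1 : Nat) : Int) := by
      rw [PySem.Int.mod_eq_emod_of_pos (by exact_mod_cast Nat.pos_of_ne_zero (by omega))]
      rw [Int.emod_eq_of_lt (by positivity) (by exact_mod_cast hlast)]
      push_cast; ring
    have hm2 : PySem.Int.mod (2 * (k : Int) + 2) ((cycle.flatMap pvNode).length : Int)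
        = ((2 * (k + 1) : Nat) : Int) := by
      rw [pvNode_flat_length]
      rw [PySem.Int.mod_eq_emod_of_pos (by exact_mod_cast Nat.pos_of_ne_zero (by omega))]
      rw [Int.emod_eq_of_lt (by positivity) (by push_cast; omega)]
      push_cast; ring
    rw [hm1, hm2]
    simp only [PySem.List.pyGetD_natCast]
    rw [pvFlat_getD_even cycle (k + 1) hlast]
  · have hke : k + 1 = cycle.length := by omega
    have hm1 : PySem.Int.mod ((k : Int) + 1) (cycle.length : Int) = ((0 : Nat) : Int) := by
      rw [PySem.Int.mod_eq_emod_of_pos (by exact_mod_cast Nat.pos_of_ne_zero (by omega))]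
      have : (k : Int) + 1 = (cycle.length : Int) := by exact_mod_cast hke
      simp [this]
    have hm2 : PySem.Int.mod (2 * (k : Int) + 2) ((cycle.flatMap pvNode).length : Int)
        = ((2 * 0 : Nat) : Int) := by
      rw [pvNode_flat_length]
      rw [PySem.Int.mod_eq_emod_of_pos (by exact_mod_cast Nat.pos_of_ne_zero (by omega))]
      have : 2 * (k : Int) + 2 = 2 * (cycle.length : Int) := by push_cast; omega
      rw [this]; simp
    rw [hm1, hm2]
    simp only [PySem.List.pyGetD_natCast]
    rw [pvFlat_getD_even cycle 0 (by omega)]
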